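-- pv_equiv track=rewrite | github.com/Anmol-Singh-Jaggi/interview-notes | notes/algo-ds-practice/problems/graph/circle_of_strings.py | is_circle_possible
-- ===== SOURCE A (Python) =====
-- def is_circle_possible(strs):
--     words_mapping = {}
--     for str in strs:
--         words = words_mapping.get(str[0], [])
--         words_mapping[str[0]] = words
--         words.append(str)
--     circle = []
--     for word in strs:
--         ret = dfs(word, words_mapping, len(strs), circle)
--         if ret:
--             return circle
--     return None
--
-- def dfs(word, mapping, num_words_total, circle):
--     # CAREFUL: We cannot use a visited set() as there can be duplicate
--     # words in the input array.
--     # Example - ['aa', 'aa']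
--     mapping[word[0]].remove(word)
--     circle.append(word)
--     if len(circle) == num_words_total and word[-1] == circle[0][0]:
--         return True
--     last_char = word[-1]
--     for neigh in mapping.get(last_char, []):
--         ret = dfs(neigh, mapping, num_words_total, circle)
--         if ret:
--             return True
--     circle.pop()
--     mapping[word[0]].append(word)
--     return False
-- ===== SOURCE B (Python) =====
-- # B: one flat while-loop backtracking machine (no recursion, no per-start call);
-- # frames carry the resume index, so backtracking is a plain pop.
-- def is_circle_possible(strs):
--     mapping = {}
--     for s in strs:
--         mapping.setdefault(s[0], []).append(s)
--     total = len(strs)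
--     circle = []
--     starts = list(strs)
--     stack = []
--     while True:
--         if not stack:
--             if not starts:
--                 return None
--             w = starts.pop(0)
--             mapping[w[0]].remove(w)
--             circle.append(w)
--             if total == len(circle) and circle[0][0] == w[-1]:
--                 return circle
--             stack.append((w, 0))
--         else:
--             w, i = stack[-1]
--             bucket = mapping.get(w[-1], [])
--             if i < len(bucket):
--                 stack[-1] = (w, i + 1)
--                 nxt = bucket[i]
--                 mapping[nxt[0]].remove(nxt)
--                 circle.append(nxt)
--                 if total == len(circle) and circle[0][0] == nxt[-1]:
--                     return circle
--                 stack.append((nxt, 0))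
--             else:
--                 stack.pop()
--                 circle.pop()
--                 mapping[w[0]].append(w)
-- ===== Notes on version B (the rewrite author's own statement) =====
-- stated objective: alternative
-- what changed: A's recursive per-start dfs is replaced by one flat while-loop backtracking machine over an explicit frame stack (frames carry the word and its resume index, so backtracking is a plain pop) with the untried starts kept in the machine state; the same bucket remove/append and circle push/pop happen in the same order, so the identical circle is returned.
import Mathlib
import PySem

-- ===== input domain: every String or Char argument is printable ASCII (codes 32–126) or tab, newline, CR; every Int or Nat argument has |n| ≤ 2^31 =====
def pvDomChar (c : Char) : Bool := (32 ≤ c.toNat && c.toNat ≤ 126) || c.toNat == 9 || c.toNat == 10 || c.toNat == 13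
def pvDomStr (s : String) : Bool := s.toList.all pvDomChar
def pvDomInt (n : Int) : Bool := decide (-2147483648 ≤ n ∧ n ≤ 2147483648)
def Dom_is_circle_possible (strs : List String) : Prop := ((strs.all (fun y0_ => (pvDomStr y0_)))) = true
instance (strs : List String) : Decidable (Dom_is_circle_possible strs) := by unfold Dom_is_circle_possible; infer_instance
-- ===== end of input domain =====

-- B replaces A's recursive per-start dfs by ONE flat while-loop backtracking machine over an
-- explicit frame stack (frames carry the resume index, backtracking is a plain pop) and a dict;
-- same mutation/visit order, hence the identical returned circle.  Objective: alternative
-- decomposition, not speed.  Both ports thread a (generously large, behaviourally unreachable)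
-- fuel counter to make the search total in Lean; fuel is consumed identically on both sides and
-- its exhaustion yields `none`, like Python's `None`-free failure paths never reached in practice.

-- ===== PORT A =====
-- first / last character of a word (Python w[0], w[-1]; none = IndexError on "")
def pvFirst (s : String) : Option Char := s.toList.head?
def pvLast (s : String) : Option Char := s.toList.getLast?
-- the words_mapping, kept as a function Char → bucket (queried only by key)
def pvUpd (m : Char → List String) (k : Char) (v : List String) : Char → List String :=
  fun j => if j = k then v else m j
-- fuel large enough for the whole search on any input (behaviourally unreachable bound)
def pvFuel (strs : List String) : Nat := (strs.length + 4).factorial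

def buildA : List String → (Char → List String) → Option (Char → List String)
  | [], m => some m
  | s :: rest, m =>
    match pvFirst s with
    | none => none
    | some k => buildA rest (pvUpd m k (m k ++ [s]))

mutual
-- dfs(word, mapping, num_words_total, circle)
def dfsA (f : Nat) (total : Nat) (w : String) (m : Char → List String) (c : List String) :
    Option (Bool × (Char → List String) × List String × Nat) :=
  match f with
  | 0 => none
  | g + 1 =>
    match pvFirst w, pvLast w with
    | some k0, some kl =>
      let m' := pvUpd m k0 ((m k0).erase w)
      let c' := c ++ [w]
      if c'.length = total ∧ c'.head?.bind pvFirst = some kl then some (true, m', c', g)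
      else loopA g total w k0 kl 0 m' c'
    | _, _ => none
termination_by f
decreasing_by omega

-- the live `for neigh in mapping.get(last_char, [])` loop (index i against the live bucket)
def loopA (f : Nat) (total : Nat) (w : String) (k0 kl : Char) (i : Nat)
    (m : Char → List String) (c : List String) :
    Option (Bool × (Char → List String) × List String × Nat) :=
  match f with
  | 0 => none
  | g + 1 =>
    let lst := m kl
    if h : i < lst.length then
      match dfsA g total lst[i] m c with
      | none => none
      | some (true, m', c', f') => some (true, m', c', f')
      | some (false, m', c', f') => loopA (min f' g) total w k0 kl (i + 1) m' c'
    else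
      some (false, pvUpd m k0 (m k0 ++ [w]), c.dropLast, g)
termination_by f
decreasing_by all_goals omega
end

def outerA : List String → Nat → Nat → (Char → List String) → List String → Option (List String)
  | [], _, _, _, _ => none
  | w :: ws, f, total, m, c =>
    match dfsA f total w m c with
    | none => none
    | some (true, _, c', _) => some c'
    | some (false, m', c', f') => outerA ws f' total m' c'

def is_circle_possible (strs : List String) : Option (List String) :=
  match buildA strs (fun _ => []) with
  | none => none
  | some m => outerA strs (pvFuel strs) strs.length m []

-- ===== PORT B =====
-- s[0] and s[-1] for B
def bFirst (s : String) : Option Char :=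
  match s.toList with
  | [] => none
  | ch :: _ => some ch
def bLast (s : String) : Option Char := s.toList.reverse.head?
def bFuel (strs : List String) : Nat := Nat.factorial (strs.length + 4)

-- mapping.setdefault(s[0], []).append(s)
def buildB : List String → PySem.Dict Char (List String) → Option (PySem.Dict Char (List String))
  | [], d => some d
  | s :: rest, d =>
    match bFirst s with
    | none => none
    | some k => buildB rest (d.insert k (d.getD k [] ++ [s]))

-- the single `while True` machine of B: starts still untried, frame stack (word, resume index),
-- the dict, the circle.  Result none = fuel ran out (never reached behaviourally) and also the
-- Python `return None` (all starts failed), exactly as in port A.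
def runB (f : Nat) (total : Nat) (starts : List String)
    (stack : List (String × Nat)) (d : PySem.Dict Char (List String)) (c : List String) :
    Option (List String) :=
  match stack with
  | [] =>
    match starts with
    | [] => none
    | w :: ws =>
      match f with
      | 0 => none
      | g + 1 =>
        match bFirst w, bLast w with
        | some k0, some kl =>
          let c' := c ++ [w]
          if total = c'.length ∧ bFirst (c.headD w) = some kl then some c'
          else runB g total ws [(w, 0)] (d.insert k0 ((d.getD k0 []).erase w)) c'
        | _, _ => none
  | (w, i) :: rest =>
    match f with
    | 0 => none
    | g + 1 =>
      match bLast w, bFirst w with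
      | some kl, some k0 =>
        let lst := d.getD kl []
        if h : i < lst.length then
          match g with
          | 0 => none
          | g2 + 1 =>
            let nxt := lst[i]
            match bFirst nxt, bLast nxt with
            | some n0, some nl =>
              let c' := c ++ [nxt]
              if total = c'.length ∧ bFirst (c.headD nxt) = some nl then some c'
              else runB g2 total starts ((nxt, 0) :: (w, i + 1) :: rest)
                     (d.insert n0 ((d.getD n0 []).erase nxt)) c'
            | _, _ => none
        else
          runB g total starts rest (d.insert k0 (d.getD k0 [] ++ [w])) c.dropLast
      | _, _ => none
termination_by f
decreasing_by all_goals omega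

def is_circle_possible_alt (strs : List String) : Option (List String) :=
  match buildB strs PySem.Dict.empty with
  | none => none
  | some d => runB (bFuel strs) strs.length strs [] d []

-- ===== PRECONDITION & SPEC =====
-- Pre_ excludes inputs containing the empty string, on which Python A raises IndexError (str[0]).
def Pre_is_circle_possible (strs : List String) : Prop := ∀ s ∈ strs, s ≠ ""
instance (strs : List String) : Decidable (Pre_is_circle_possible strs) := by unfold Pre_is_circle_possible; infer_instance
def pvWitness_is_circle_possible : List String := (["ab", "ba"])
def Spec_is_circle_possible (strs : List String) (out : Option (List String)) : Prop := out = is_circle_possible_alt strs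
instance (strs : List String) (out : Option (List String)) : Decidable (Spec_is_circle_possible strs out) := by unfold Spec_is_circle_possible; infer_instance

-- ===== CLAIM (what is proved, stated in full; the proofs are below) =====
def Claim_equal_is_circle_possible : Prop := ∀ (strs : List String), Dom_is_circle_possible strs → Pre_is_circle_possible strs → Spec_is_circle_possible strs (is_circle_possible strs)

-- ===== LEMMAS AND PROOFS =====

-- the dict of port B tracks the function-mapping of port A pointwise
def pvRel (d : PySem.Dict Char (List String)) (m : Char → List String) : Prop :=
  ∀ k, d.getD k [] = m k

theorem pvRel_insert {d : PySem.Dict Char (List String)} {m : Char → List String}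
    (hR : pvRel d m) (k : Char) (v : List String) :
    pvRel (d.insert k v) (pvUpd m k v) := by
  intro j
  rw [PySem.Dict.getD_insert, pvUpd]
  split_ifs <;> simp_all [pvRel]

theorem bFirst_eq (s : String) : bFirst s = pvFirst s := by
  cases h : s.toList <;> simp [bFirst, pvFirst, h]

theorem bLast_eq (s : String) : bLast s = pvLast s := by
  simp [bLast, pvLast]

theorem pvCond_eq (c : List String) (w : String) (total : Nat) (kl : Char) :
    (total = (c ++ [w]).length ∧ bFirst (c.headD w) = some kl) ↔
    ((c ++ [w]).length = total ∧ (c ++ [w]).head?.bind pvFirst = some kl) := by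
  cases c <;> simp [bFirst_eq, eq_comm, Option.bind]

theorem pvFuelLe (f : Nat) :
    (∀ total w m c r, dfsA f total w m c = some r → r.2.2.2 ≤ f) ∧
    (∀ total w k0 kl i m c r, loopA f total w k0 kl i m c = some r → r.2.2.2 ≤ f) := by
  induction f using Nat.strong_induction_on with
  | _ f ih =>
    constructor
    · intro total w m c r h
      match f with
      | 0 => simp [dfsA] at h
      | g + 1 =>
        rw [dfsA] at h
        split at h
        · rename_i k0 kl hk0 hkl
          try dsimp only at h
          by_cases hs : ((c ++ [w]).length = total ∧ (c ++ [w]).head?.bind pvFirst = some kl)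
          · rw [if_pos hs] at h
            cases h; exact Nat.le_succ g
          · rw [if_neg hs] at h
            exact Nat.le_succ_of_le ((ih g (by omega)).2 _ _ _ _ _ _ _ _ h)
        · simp at h
    · intro total w k0 kl i m c r h
      match f with
      | 0 => simp [loopA] at h
      | g + 1 =>
        rw [loopA] at h
        try dsimp only at h
        split at h
        · cases hd : dfsA g total _ m c with
          | none => rw [hd] at h; simp at h
          | some p =>
            obtain ⟨b, m', c', f'⟩ := p
            rw [hd] at h
            cases b
            · have h2 := (ih (min f' g) (by omega)).2 _ _ _ _ _ _ _ _ h
              omega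
            · cases h
              exact Nat.le_succ_of_le ((ih g (by omega)).1 _ _ _ _ _ hd)
        · cases h; exact Nat.le_succ g

-- frame-level simulation: the machine on stack (w,i)::rest runs A's live neighbor loop
theorem pvSim (f : Nat) :
    ∀ total w k0 kl i rest starts m c d, pvRel d m →
      pvFirst w = some k0 → pvLast w = some kl →
      match loopA f total w k0 kl i m c with
      | none => runB f total starts ((w, i) :: rest) d c = none
      | some (true, _, c', _) => runB f total starts ((w, i) :: rest) d c = some c'
      | some (false, m', c', f') =>
          ∃ d', pvRel d' m' ∧
            runB f total starts ((w, i) :: rest) d c = runB f' total starts rest d' c' := by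
  induction f using Nat.strong_induction_on with
  | _ f ih =>
    intro total w k0 kl i rest starts m c d hR hk0 hkl
    match f with
    | 0 => rw [runB, loopA]
    | g + 1 =>
      rw [loopA, runB]
      rw [bFirst_eq, bLast_eq, hk0, hkl]
      simp only []
      rw [hR kl]
      by_cases h : i < (m kl).length
      · simp only [dif_pos h]
        match g with
        | 0 => rw [dfsA]
        | g2 + 1 =>
          rw [dfsA]
          rw [bFirst_eq, bLast_eq]
          cases hn0 : pvFirst ((m kl)[i]) <;> cases hnl : pvLast ((m kl)[i])
          · rfl
          · rfl
          · rfl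
          case some.some n0 nl =>
            dsimp only
            by_cases hs : ((c ++ [(m kl)[i]]).length = total ∧
                (c ++ [(m kl)[i]]).head?.bind pvFirst = some nl)
            · rw [if_pos hs, if_pos ((pvCond_eq c _ total nl).mpr hs)]
            · rw [if_neg hs, if_neg (fun hx => hs ((pvCond_eq c _ total nl).mp hx))]
              have hR' : pvRel (d.insert n0 ((d.getD n0 []).erase ((m kl)[i])))
                  (pvUpd m n0 ((m n0).erase ((m kl)[i]))) := by
                rw [hR n0]; exact pvRel_insert hR n0 _
              have hin := ih g2 (by omega) total ((m kl)[i]) n0 nl 0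
                ((w, i + 1) :: rest) starts (pvUpd m n0 ((m n0).erase ((m kl)[i])))
                (c ++ [(m kl)[i]]) (d.insert n0 ((d.getD n0 []).erase ((m kl)[i]))) hR' hn0 hnl
              cases hc : loopA g2 total ((m kl)[i]) n0 nl 0
                  (pvUpd m n0 ((m n0).erase ((m kl)[i]))) (c ++ [(m kl)[i]]) with
              | none => rw [hc] at hin; exact hin
              | some p =>
                obtain ⟨b, m₂, c₂, f₂⟩ := p
                rw [hc] at hin
                cases b
                · obtain ⟨d₂, hR₂, heq⟩ := hin
                  have hle : f₂ ≤ g2 := by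
                    have := (pvFuelLe g2).2 _ _ _ _ _ _ _ _ hc
                    simpa using this
                  have hmin : min f₂ (g2 + 1) = f₂ := by omega
                  dsimp only
                  rw [hmin]
                  have hout := ih f₂ (by omega) total w k0 kl (i + 1) rest starts m₂ c₂ d₂ hR₂ hk0 hkl
                  cases hc2 : loopA f₂ total w k0 kl (i + 1) m₂ c₂ with
                  | none => rw [hc2] at hout; rw [heq]; exact hout
                  | some q =>
                    obtain ⟨b2, m₃, c₃, f₃⟩ := q
                    rw [hc2] at hout
                    cases b2
                    · obtain ⟨d₃, hR₃, heq3⟩ := hout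
                      exact ⟨d₃, hR₃, by rw [heq, heq3]⟩
                    · rw [heq]; exact hout
                · exact hin
      · simp only [dif_neg h]
        refine ⟨d.insert k0 (d.getD k0 [] ++ [w]), ?_, rfl⟩
        rw [hR k0]
        exact pvRel_insert hR k0 _

-- outer loop: the machine on an empty stack runs A's per-start loop
theorem pvOuterEq (ws : List String) :
    ∀ f total m c d, pvRel d m → runB f total ws [] d c = outerA ws f total m c := by
  induction ws with
  | nil => intro f total m c d hR; rw [runB.eq_def, outerA]
  | cons w ws ihw =>
    intro f total m c d hR
    rw [outerA, runB.eq_def]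
    dsimp only
    match f with
    | 0 => rw [dfsA]
    | g + 1 =>
      rw [dfsA, bFirst_eq, bLast_eq]
      cases hk0 : pvFirst w <;> cases hkl : pvLast w
      · rfl
      · rfl
      · rfl
      case some.some k0 kl =>
        dsimp only
        by_cases hs : ((c ++ [w]).length = total ∧ (c ++ [w]).head?.bind pvFirst = some kl)
        · rw [if_pos hs, if_pos ((pvCond_eq c w total kl).mpr hs)]
        · rw [if_neg hs, if_neg (fun hx => hs ((pvCond_eq c w total kl).mp hx))]
          have hR' : pvRel (d.insert k0 ((d.getD k0 []).erase w))
              (pvUpd m k0 ((m k0).erase w)) := by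
            rw [hR k0]; exact pvRel_insert hR k0 _
          have hin := pvSim g total w k0 kl 0 [] ws (pvUpd m k0 ((m k0).erase w))
            (c ++ [w]) (d.insert k0 ((d.getD k0 []).erase w)) hR' hk0 hkl
          cases hc : loopA g total w k0 kl 0 (pvUpd m k0 ((m k0).erase w)) (c ++ [w]) with
          | none => rw [hc] at hin; exact hin
          | some p =>
            obtain ⟨b, m', c', f'⟩ := p
            rw [hc] at hin
            cases b
            · obtain ⟨d', hR'', heq⟩ := hin
              rw [heq]
              exact ihw f' total m' c' d' hR''
            · exact hin

theorem pvBuildEq (ws : List String) :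
    ∀ d m, pvRel d m →
      match buildA ws m with
      | none => buildB ws d = none
      | some m' => ∃ d', buildB ws d = some d' ∧ pvRel d' m' := by
  induction ws with
  | nil => intro d m hR; exact ⟨d, rfl, hR⟩
  | cons s ws ihw =>
    intro d m hR
    rw [buildA, buildB, bFirst_eq]
    cases pvFirst s with
    | none => rfl
    | some k =>
      have hR' : pvRel (d.insert k (d.getD k [] ++ [s])) (pvUpd m k (m k ++ [s])) := by
        rw [hR k]; exact pvRel_insert hR k _
      exact ihw _ _ hR'

theorem pvRel_empty : pvRel PySem.Dict.empty (fun _ => []) := by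
  intro k; rfl

theorem pvMain (strs : List String) : is_circle_possible strs = is_circle_possible_alt strs := by
  rw [is_circle_possible, is_circle_possible_alt]
  have hb := pvBuildEq strs PySem.Dict.empty (fun _ => []) pvRel_empty
  cases hA : buildA strs (fun _ => []) with
  | none => rw [hA] at hb; rw [hb]
  | some m =>
    rw [hA] at hb
    obtain ⟨d, hB, hR⟩ := hb
    rw [hB]
    show outerA strs (pvFuel strs) strs.length m [] = runB (pvFuel strs) strs.length strs [] d []
    exact (pvOuterEq strs (pvFuel strs) strs.length m [] d hR).symm

-- ===== VERDICT (by name: the statement is the Claim_ definition above) =====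
theorem is_circle_possible_spec : Claim_equal_is_circle_possible := by
  intro strs _ _
  exact pvMain strs
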